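-- pv_equiv track=rewrite | github.com/povelfk/DeepLearning20-Project-MixMatch | mixmatch.py | interleaveOffsets
-- ===== SOURCE A (Python) =====
-- def interleaveOffsets(batch, nu):
--     groups = [batch // (nu + 1)] * (nu + 1)
--     for x in range(batch - sum(groups)):
--         groups[-x - 1] += 1
--     offsets = [0]
--     for g in groups:
--         offsets.append(offsets[-1] + g)
--     assert offsets[-1] == batch
--     return offsets
-- ===== SOURCE B (Python) =====
-- def interleaveOffsets(batch, nu):
--     base, rem = divmod(batch, nu + 1)
--     cut = nu + 1 - rem  # number of groups that do NOT carry an extra unit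
--     offsets = [i * base + max(0, i - cut) for i in range(nu + 2)]
--     assert offsets[-1] == batch  # same sanity check as the original
--     return offsets
-- ===== Notes on version B (the rewrite author's own statement) =====
-- stated objective: simpler
-- what changed: Replaces the bump-distribution loop over a groups list plus a prefix-sum loop by a single closed-form pass: offsets[i] = i*base + max(0, i - (nu+1-rem)) with base, rem = divmod(batch, nu+1).
-- outside the precondition, e.g. on interleaveOffsets(0, -3): A returns [0], B raises IndexError
import Mathlib
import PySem

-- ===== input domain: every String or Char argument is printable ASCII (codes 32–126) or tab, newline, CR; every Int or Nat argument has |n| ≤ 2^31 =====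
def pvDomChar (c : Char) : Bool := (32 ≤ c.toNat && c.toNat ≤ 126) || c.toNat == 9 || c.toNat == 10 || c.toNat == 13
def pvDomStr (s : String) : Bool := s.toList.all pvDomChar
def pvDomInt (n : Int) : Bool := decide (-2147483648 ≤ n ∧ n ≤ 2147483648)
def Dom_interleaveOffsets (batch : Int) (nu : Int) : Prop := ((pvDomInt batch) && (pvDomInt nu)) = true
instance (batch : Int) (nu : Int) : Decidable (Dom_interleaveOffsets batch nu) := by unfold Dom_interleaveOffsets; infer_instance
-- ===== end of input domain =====

-- B computes each offset by the closed form i*base + max(0, i - cut) in one pass, with no groups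
-- list and no bump/prefix-sum loops (objective: simpler).

-- ===== PORT A =====
-- groups = [batch // (nu+1)] * (nu+1); Python list-multiplication gives [] for nu+1 ≤ 0, hence .toNat.
-- for x in range(k): x is only used in the index len-1-x, so we fold over List.range k.toNat (exact:
-- Python's range(k) is empty for k ≤ 0 and yields 0..k-1 otherwise); groups[-x-1] += 1 becomes a
-- set at index len-1-x (in range whenever Python does not raise IndexError; Pre_ excludes the raising inputs).
def interleaveOffsets (batch : Int) (nu : Int) : List Int :=
  let groups := List.replicate (nu + 1).toNat (PySem.Int.floordiv batch (nu + 1))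
  let groups := (List.range (batch - groups.sum).toNat).foldl
    (fun gs x =>
      let i := gs.length - 1 - x
      gs.set i (gs.getD i 0 + 1)) groups
  -- offsets = [0]; for g in groups: offsets.append(offsets[-1] + g)  (offsets is never empty)
  groups.foldl (fun offs g => offs ++ [offs.getLastD 0 + g]) [0]
  -- the assert (offsets[-1] == batch) holds on Pre_; inputs where it fails are outside Pre_

-- ===== PORT B =====
-- B's assert also holds whenever Pre_ does (offsets[-1] = batch by algebra for nu ≥ 0); the inputs
-- where it raises (nu < -1, where offsets=[] and offsets[-1] is an IndexError) lie outside Pre_.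
def interleaveOffsets_alt (batch : Int) (nu : Int) : List Int :=
  let base := PySem.Int.floordiv batch (nu + 1)
  let rem := PySem.Int.mod batch (nu + 1)
  let cut := nu + 1 - rem
  (PySem.List.pyRange 0 (nu + 2) 1).map (fun i => i * base + max 0 (i - cut))

-- ===== PRECONDITION & SPEC =====
-- A raises for all nu < 0 except one corner: nu = -1 is a ZeroDivisionError; for nu < -1 the list
-- [..]*(nu+1) is empty, so A raises IndexError (batch > 0) or fails its assert (batch < 0), except
-- that at batch = 0 it accidentally returns [0] from the empty groups list — that corner is excluded
-- as an artefact of Python's negative list multiplication (B raises IndexError there; cited in claim.json).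
def Pre_interleaveOffsets (batch : Int) (nu : Int) : Prop := 0 ≤ nu
instance (batch : Int) (nu : Int) : Decidable (Pre_interleaveOffsets batch nu) := by
  unfold Pre_interleaveOffsets; infer_instance
def pvWitness_interleaveOffsets : Int × Int := (10, 2)

def Spec_interleaveOffsets (batch : Int) (nu : Int) (out : List Int) : Prop :=
  out = interleaveOffsets_alt batch nu
instance (batch : Int) (nu : Int) (out : List Int) : Decidable (Spec_interleaveOffsets batch nu out) := by
  unfold Spec_interleaveOffsets; infer_instance

-- ===== CLAIM =====
def Claim_equal_interleaveOffsets : Prop := ∀ (batch : Int) (nu : Int),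
  Dom_interleaveOffsets batch nu → Pre_interleaveOffsets batch nu →
    Spec_interleaveOffsets batch nu (interleaveOffsets batch nu)

-- ===== LEMMAS AND PROOFS =====

-- setting the last slot of a replicate
theorem pv_set_last_replicate (k : Nat) (a b : Int) :
    (List.replicate (k + 1) a).set k b = List.replicate k a ++ [b] := by
  induction k with
  | zero => rfl
  | succ k ih =>
      rw [List.replicate_succ, List.set_cons_succ, ih, List.replicate_succ]
      rfl

-- A's bump loop distributes r extra units onto the last r groups
theorem pv_bump (m : Nat) (base : Int) (r : Nat) (hr : r ≤ m) :
    (List.range r).foldl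
      (fun gs x =>
        let i := gs.length - 1 - x
        gs.set i (gs.getD i 0 + 1)) (List.replicate m base)
    = List.replicate (m - r) base ++ List.replicate r (base + 1) := by
  induction r with
  | zero => simp
  | succ r ih =>
      have hr' : r ≤ m := Nat.le_of_succ_le hr
      rw [List.range_succ, List.foldl_append, ih hr']
      have hlen : (List.replicate (m - r) base ++ List.replicate r (base + 1)).length = m := by
        simp; omega
      have hp : m - r = (m - (r + 1)) + 1 := by omega
      simp only [List.foldl_cons, List.foldl_nil, hlen]
      have hidx : m - 1 - r = m - (r + 1) := by omega
      rw [hidx]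
      have hlt : m - (r + 1) < (List.replicate (m - r) base).length := by simp; omega
      rw [List.getD_append _ _ _ _ hlt, List.set_append_left _ _ hlt]
      rw [List.getD_replicate]
      rw [hp, pv_set_last_replicate]
      simp [List.append_assoc, List.replicate_succ]
      omega

-- A's offsets loop is a prefix-sum
theorem pv_offsets (gs : List Int) (acc : List Int) :
    gs.foldl (fun offs g => offs ++ [offs.getLastD 0 + g]) acc
    = acc ++ (List.range gs.length).map (fun i => acc.getLastD 0 + ((gs.take (i + 1)).sum)) := by
  induction gs generalizing acc with
  | nil => simp
  | cons g gs ih =>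
      simp only [List.foldl_cons]
      rw [ih]
      simp only [List.getLastD_concat, List.length_cons, List.range_succ_eq_map, List.map_cons,
        List.map_map]
      simp [List.append_assoc, List.take_succ_cons]
      intro a _
      ring

-- partial sums of (m-r) copies of base followed by r copies of base+1
theorem pv_take_sum (m r : Nat) (hr : r ≤ m) (base : Int) (j : Nat) (hj : j ≤ m) :
    ((List.replicate (m - r) base ++ List.replicate r (base + 1)).take j).sum
      = j * base + max 0 ((j : Int) - ((m : Int) - (r : Int))) := by
  by_cases h : j ≤ m - r
  · rw [List.take_append_of_le_length (by simpa using h)]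
    rw [List.take_replicate]
    have : min j (m - r) = j := by omega
    simp [this, List.sum_replicate, mul_comm]
    omega
  · have hlen : (List.replicate (m - r) base).length = m - r := by simp
    rw [List.take_append]
    rw [List.take_replicate, List.take_replicate, hlen]
    have h1 : min j (m - r) = m - r := by omega
    have h2 : min (j - (m - r)) r = j - (m - r) := by omega
    rw [h1, h2]
    simp [List.sum_replicate]
    have hc : ((m - r : Nat) : Int) = (m : Int) - (r : Int) := by omega
    have hd : ((j - (m - r) : Nat) : Int) = (j : Int) - ((m : Int) - (r : Int)) := by omega
    have hmax : max 0 ((j : Int) - ((m : Int) - (r : Int))) = (j : Int) - ((m : Int) - (r : Int)) := by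
      omega
    rw [hc, hd, hmax]
    ring

-- ===== VERDICT =====
theorem interleaveOffsets_spec : Claim_equal_interleaveOffsets := by
  intro batch nu _ hpre
  have hnu : 0 ≤ nu := hpre
  unfold Spec_interleaveOffsets interleaveOffsets interleaveOffsets_alt
  simp only []
  set base := PySem.Int.floordiv batch (nu + 1) with hbase
  set rem := PySem.Int.mod batch (nu + 1) with hrem
  have hne : nu + 1 ≠ 0 := by omega
  have hdm : base * (nu + 1) + rem = batch := PySem.Int.floordiv_mul_add_mod batch (nu + 1)
  have hr0 : 0 ≤ rem := PySem.Int.mod_nonneg (a := batch) (b := nu + 1) (by omega)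
  have hrlt : rem < nu + 1 := PySem.Int.mod_lt (a := batch) (b := nu + 1) (by omega)
  set m := (nu + 1).toNat with hm
  have hmi : (m : Int) = nu + 1 := by omega
  -- the replicate sum
  have hsum : (List.replicate m base).sum = (m : Int) * base := by
    simp [List.sum_replicate]
  have hbr : batch - (List.replicate m base).sum = rem := by
    rw [hsum, hmi, mul_comm (nu + 1) base]
    linarith [hdm]
  rw [hbr]
  set r := rem.toNat with hrn
  have hri : (r : Int) = rem := by omega
  have hrm : r ≤ m := by omega
  rw [pv_bump m base r hrm, pv_offsets]
  have hlen : (List.replicate (m - r) base ++ List.replicate r (base + 1)).length = m := by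
    simp; omega
  rw [hlen]
  rw [PySem.List.pyRange_one]
  have h2 : (nu + 2 - 0).toNat = m + 1 := by omega
  rw [h2, List.range_succ_eq_map]
  simp only [List.map_cons, List.map_map, List.singleton_append]
  have hcut : nu + 1 - rem = (m : Int) - (r : Int) := by omega
  have hhead : (0 : Int) + (0 : Int) * base + max 0 (0 + 0 - (nu + 1 - rem)) = 0 := by
    have h0 : max (0:Int) (0 + 0 - (nu + 1 - rem)) = 0 := by omega
    rw [h0]; ring
  rw [List.cons_eq_cons]
  constructor
  · simpa using hhead
  · apply List.map_congr_left
    intro i hi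
    have him : i < m := List.mem_range.mp hi
    have hji : i + 1 ≤ m := by omega
    rw [pv_take_sum m r hrm base (i + 1) hji]
    simp only [Function.comp]
    have : (0 : Int) + (↑(i + 1) * base + max 0 ((↑(i + 1) : Int) - ((m : Int) - (r : Int))))
        = (0 + ↑(i + 1)) * base + max 0 (0 + ↑(i + 1) - (nu + 1 - rem)) := by
      rw [hcut]; push_cast; ring_nf
    push_cast at this ⊢
    simpa using this
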